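-- pv_equiv track=rewrite | github.com/BryannGan/BryanSVwork | get_attributes_to_cl.py | get_connectivity
-- ===== SOURCE A (Python) =====
-- def get_connectivity(connected_pointId_pair):
--     # given a list like this [[0, 36], [1, 79], [1, 164], [3, 99], [3, 159], [4, 82], [6, 179], [7, 158], [8, 118], [8, 163], [9, 169], [11, 81], [12, 127], [12, 161], [13, 132], [15, 13], [16, 26], [17, 52], [19, 83], [19, 129], [20, 56], [20, 94], [21, 64], [22, 154], [23, 49], [23, 196], [24, 22], [25, 51], [27, 141], [28, 61], [28, 65], [29, 204], [31, 105], [32, 69], [32, 106], [33, 117], [34, 20], [34, 113], [35, 78], [37, 79], [38, 176], [39, 196], [42, 67], [42, 136], [43, 35], [45, 175]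
--     # return what number occured once, twice, etc
--     # return a dictionary with keys being the number of repetition and values being the number
--     dict = {}
--     for pair in connected_pointId_pair:
--         for pt in pair:
--             if pt in dict:
--                 dict[pt] += 1
--             else:
--                 dict[pt] = 1
--     # make the keys go from low to high
--     dict = dict.items()
--     dict = sorted(dict)
--     # dict = [(0, 2), (1, 2), (2, 2), (3, 2), (4, 2), (5, 2), (6, 2), (7, 2), (8, 2), (9, 2), (10, 2), (11, 2), (12, 2), (13, 2), (14, 2), (15, 2), (16, 2), (17, 2), (18, 2), (19, 2), (20, 3), (21, 2), (22, 2), (23, 3), (24, 2), (25, 2), (26, 1), (27, 2), (28, 3), (29, 2), (30, 2), (31, 2), (32, 2), (33, 2), (34, 2), (35, 2), (36, 2), (37, 2), (38, 2), (39, 2), (40, 2), (41, 2), (42, 2), (43, 2), (44, 2), (45, 2), (46, 2), (47, 2), (48, 2), (49, 2), (50, 2), (51, 2), (52, 2), (53, 3), (54, 1), (55, 2), (56, 2), (57, 2), (58, 2), (59, 2), (60, 2), (61, 2), (62, 2), (63, 2), (64, 2), (65, 2), (66, 2), (67, 2), (68, 2), (69, 2), (70, 2), (71, 2), (72, 2),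 (73, 2), (74, 2), (75, 2), (76, 2), (77, 2), (78, 2), (79, 2), (80, 2), (81, 2), (82, 2), (83, 2), (84, 2), (85, 2), (86, 2), (87, 2), (88, 2), (89, 2), (90, 2), (91, 2), (92, 2), (93, 2), (94, 2), (95, 2), (96, 1), (97, 2), (98, 2), (99, 2), (100, 2), (101, 2), (102, 2), (103, 3), (104, 2), (105, 2), (106, 2), (107, 2), (108, 2), (109, 2), (110, 2), (111, 2), (112, 2), (113, 2), (114, 1), (115, 2), (116, 1), (117, 2), (118, 2), (119, 2), (120, 2), (121, 2), (122, 2), (123, 2), (124, 2), (125, 2), (126, 1), (127, 2), (128, 2), (129, 2), (130, 2), (131, 2), (132, 2), (133, 2), (134, 2), (135, 2), (136, 2), (137, 2), (138, 2), (139, 2), (140, 2), (141, 2), (142, 2), (143, 2), (144, 2), (145, 2), (146, 2), (147, 2), (148, 2), (149, 2), (150, 2), (151, 2), (152, 2), (153, 2), (154, 2), (155, 2), (156, 2), (157, 2), (158, 2), (159, 2), (160, 2), (161, 2), (162, 2), (163, 2), (164, 2), (165, 2), (166, 2), (167, 2), (168, 2), (169, 2), (170, 2), (171, 2), (172, 2),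 (173, 2), (174, 2), (175, 2), (176, 2), (177, 2), (178, 2), (179, 2), (180, 2), (181, 2), (182, 2), (183, 2), (184, 2), (185, 2), (186, 2), (187, 2), (188, 2), (189, 2), (190, 1), (191, 2), (192, 2), (193, 2), (194, 2), (195, 2), (196, 2), (197, 2), (198, 2), (199, 2), (200, 2), (201, 2), (202, 2), (203, 2), (204, 2), (205, 2)]
--     # find largest number in the second element
--     # make tuple in dict into list
--     for i in range(len(dict)):
--         dict[i] = list(dict[i])
--     # find the largest number in the second element
--
--     # max_repetition = max([pair[1] for pair in dict])
--     # create a dictionary with keys being the number of repetition and values being the number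
--     # repetition = 1 means that it is an endpoint
--     # start from an end point, use connected_pointId_pair to construct a "linked list of coordinates"
--     # pt id: [1,2,3,[3,4,5,[5,8,9]],[3,6,7]]
--
--
--     return dict
-- ===== SOURCE B (Python) =====
-- def get_connectivity(connected_pointId_pair):
--     # flatten all ids, sort the flat list, then run-length encode it: no dict at all
--     flat = sorted(pt for pair in connected_pointId_pair for pt in pair)
--     out = []
--     for pt in flat:
--         if out and out[-1][0] == pt:
--             out[-1][1] += 1
--         else:
--             out.append([pt, 1])
--     return out
-- ===== Notes on version B (the rewrite author's own statement) =====
-- stated objective: alternative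
-- what changed: Replaces A's dict-based counting followed by sorting the items with a dict-free sort-then-group pass: all ids are flattened into one list, that list is sorted, and a run-length walk over the sorted list emits each [id, count] directly in order.
import Mathlib
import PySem

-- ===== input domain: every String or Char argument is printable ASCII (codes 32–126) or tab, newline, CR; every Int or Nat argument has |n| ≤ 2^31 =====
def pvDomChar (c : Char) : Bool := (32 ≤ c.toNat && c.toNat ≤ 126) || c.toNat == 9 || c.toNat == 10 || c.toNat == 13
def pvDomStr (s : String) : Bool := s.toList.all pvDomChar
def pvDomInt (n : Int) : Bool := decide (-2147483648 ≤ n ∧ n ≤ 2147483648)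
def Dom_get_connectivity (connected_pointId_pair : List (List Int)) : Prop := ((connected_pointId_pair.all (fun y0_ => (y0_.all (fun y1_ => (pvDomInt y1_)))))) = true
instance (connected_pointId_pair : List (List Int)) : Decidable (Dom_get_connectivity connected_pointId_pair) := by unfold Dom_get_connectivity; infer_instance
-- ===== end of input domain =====

-- B replaces A's dict counting + item sort by a dict-free sort-then-run-length-group pass (alternative algorithm, same result).

-- ===== PORT A =====
-- the dict loop: `if pt in dict: dict[pt] += 1 else: dict[pt] = 1`
-- (`dict[pt] += 1` reads d[pt], which exists in that branch, so getD is exact there)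
def get_connectivity (connected_pointId_pair : List (List Int)) : List (List Int) :=
  let d : PySem.Dict Int Int := connected_pointId_pair.foldl
    (fun d pair => pair.foldl
      (fun d pt => if d.contains pt then d.insert pt (d.getD pt 0 + 1) else d.insert pt 1) d)
    PySem.Dict.empty
  -- dict = sorted(dict.items()): plain tuple sort = lexicographic (key1, key2) sort
  let s := PySem.List.sorted2 d.items Prod.fst Prod.snd
  -- for i in range(len(dict)): dict[i] = list(dict[i])
  s.map (fun p => [p.1, p.2])

-- ===== PORT B =====
-- `if out and out[-1][0] == pt: out[-1][1] += 1 else: out.append([pt, 1])`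
-- (every element of out is a 2-list built below, so out[-1][0] / out[-1][1] always succeed;
--  headD / getD are exact on those)
def pvRlStep (out : List (List Int)) (pt : Int) : List (List Int) :=
  match out.getLast? with
  | some last =>
      if last.headD 0 = pt then out.dropLast ++ [[last.headD 0, last.getD 1 0 + 1]]
      else out ++ [[pt, 1]]
  | none => out ++ [[pt, 1]]

def get_connectivity_alt (connected_pointId_pair : List (List Int)) : List (List Int) :=
  let flat := PySem.List.sorted (connected_pointId_pair.flatMap (fun pair => pair)) (fun x => x)
  flat.foldl pvRlStep []

-- ===== PRECONDITION & SPEC =====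
def Spec_get_connectivity (connected_pointId_pair : List (List Int)) (out : List (List Int)) : Prop := out = get_connectivity_alt connected_pointId_pair
instance (connected_pointId_pair : List (List Int)) (out : List (List Int)) : Decidable (Spec_get_connectivity connected_pointId_pair out) := by unfold Spec_get_connectivity; infer_instance

-- ===== CLAIM (what is proved, stated in full; the proofs are below) =====
def Claim_equal_get_connectivity : Prop := ∀ (connected_pointId_pair : List (List Int)), Dom_get_connectivity connected_pointId_pair → Spec_get_connectivity connected_pointId_pair (get_connectivity connected_pointId_pair)

-- ===== LEMMAS AND PROOFS =====

-- the common canonical value: sorted distinct ids, each with its multiplicity in the flat id list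
def pvTarget (l : List (List Int)) : List (List Int) :=
  (PySem.List.sorted (PySem.Set.ofList l.flatten) (fun x => x)).map
    (fun k => [k, (List.count k l.flatten : Int)])

-- insertBy only compares elements of the list being sorted
theorem pv_insertBy_congr {α : Type} (b1 b2 : α → α → Bool) (x : α) (acc : List α)
    (h : ∀ y ∈ acc, b1 x y = b2 x y) :
    PySem.List.insertBy b1 x acc = PySem.List.insertBy b2 x acc := by
  induction acc with
  | nil => rfl
  | cons y ys ih =>
    simp only [PySem.List.insertBy]
    rw [h y (by simp)]
    split
    · rfl
    · rw [ih (fun z hz => h z (by simp [hz]))]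

theorem pv_foldl_insertBy_congr {α : Type} (P : α → Prop) (b1 b2 : α → α → Bool)
    (hb : ∀ a b, P a → P b → b1 a b = b2 a b) :
    ∀ (xs acc : List α), (∀ x ∈ xs, P x) → (∀ y ∈ acc, P y) →
    xs.foldl (fun acc x => PySem.List.insertBy b1 x acc) acc =
    xs.foldl (fun acc x => PySem.List.insertBy b2 x acc) acc := by
  intro xs
  induction xs with
  | nil => intro acc _ _; rfl
  | cons x xs ih =>
    intro acc hxs hacc
    simp only [List.foldl_cons]
    rw [pv_insertBy_congr b1 b2 x acc (fun y hy => hb x y (hxs x (by simp)) (hacc y hy))]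
    exact ih _ (fun z hz => hxs z (by simp [hz]))
      (fun y hy => ((PySem.List.mem_insertBy _ _ _ _).mp hy).elim
        (fun he => he ▸ hxs x (by simp)) (fun hm => hacc y hm))

-- A's nested dict loop builds Counter(flatten l)
theorem pv_dict_eq_counter (l : List (List Int)) :
    l.foldl (fun d pair => pair.foldl
        (fun (d : PySem.Dict Int Int) pt =>
          if d.contains pt then d.insert pt (d.getD pt 0 + 1) else d.insert pt 1) d)
      PySem.Dict.empty = PySem.Dict.counter l.flatten := by
  have hf : (fun (d : PySem.Dict Int Int) pt =>
      if d.contains pt then d.insert pt (d.getD pt 0 + 1) else d.insert pt 1)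
      = fun d pt => d.insert pt (d.getD pt 0 + 1) := by
    funext d pt
    by_cases h : d.contains pt = true
    · simp [h]
    · rw [if_neg h, PySem.Dict.getD_of_not_contains d 0 (by simpa using h)]
      norm_num
  rw [hf, ← PySem.Dict.foldl_insert_getD_add_one_eq_counter l.flatten, ← List.foldl_flatten]

-- A equals the canonical value
theorem pv_A_eq (l : List (List Int)) : get_connectivity l = pvTarget l := by
  rw [show get_connectivity l
      = (PySem.List.sorted2 (PySem.Dict.counter l.flatten).items Prod.fst Prod.snd).map
          (fun p => [p.1, p.2]) from by rw [← pv_dict_eq_counter]; rfl]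
  rw [PySem.Dict.items_counter]
  set S := PySem.Set.ofList l.flatten with hS
  set f : Int → Int × Int := fun k => (k, (List.count k l.flatten : Int)) with hfdef
  -- sorted2 by (fst, snd) = sorted by fst, because fst determines the item here
  have hkeyinj : ∀ a ∈ S.map f, ∀ b ∈ S.map f, a.1 = b.1 → a = b := by
    intro a ha b hb hab
    obtain ⟨k1, _, rfl⟩ := List.mem_map.mp ha
    obtain ⟨k2, _, rfl⟩ := List.mem_map.mp hb
    simp only [hfdef] at hab ⊢
    simp [hab]
  have hsorted2 : PySem.List.sorted2 (S.map f) Prod.fst Prod.snd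
      = PySem.List.sorted (S.map f) Prod.fst := by
    rw [PySem.List.sorted_eq_foldl_insertBy]
    show (S.map f).foldl (fun acc x => PySem.List.insertBy _ x acc) [] = _
    exact pv_foldl_insertBy_congr (fun p => p ∈ S.map f)
      (fun a b => decide (a.1 < b.1) || (!decide (b.1 < a.1) && decide (a.2 < b.2)))
      (fun a b => decide (a.1 < b.1))
      (by
        intro a b ha hb
        rcases lt_trichotomy a.1 b.1 with h | h | h
        · simp [h]
        · have : a = b := hkeyinj a ha b hb h
          subst this
          simp
        · simp [h, not_lt.mpr (le_of_lt h)])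
      (S.map f) [] (fun _ hx => hx) (by simp)
  have hmap : PySem.List.sorted (S.map f) Prod.fst
      = (PySem.List.sorted S (fun x => x)).map f := by
    apply PySem.List.sorted_eq_of_perm_of_pairwise_lt
    · exact (PySem.List.sorted_perm S (fun x => x) false).map f
    · exact (PySem.List.sorted_ofList_pairwise_lt l.flatten).map f (by intro a b h; simpa [hfdef])
  rw [hsorted2, hmap]
  simp [pvTarget, hfdef, List.map_map, Function.comp_def]
  rw [hS]

-- counts in a flatMap of replicates over distinct keys
theorem pv_count_flatMap (ks : List Int) (c : Int → Nat) (hnd : ks.Nodup) (v : Int) :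
    (ks.flatMap (fun k => List.replicate (c k) k)).count v = if v ∈ ks then c v else 0 := by
  induction ks with
  | nil => simp
  | cons k ks ih =>
    simp only [List.flatMap_cons, List.count_append, List.count_replicate,
      ih (List.nodup_cons.mp hnd).2]
    by_cases hv : v = k
    · subst hv
      simp [(List.nodup_cons.mp hnd).1]
    · simp [hv, Ne.symm hv]

-- the sorted flat list is the concatenation of its runs
theorem pv_sorted_flat (l : List (List Int)) :
    PySem.List.sorted (l.flatMap (fun pair => pair)) (fun x => x)
      = (PySem.List.sorted (PySem.Set.ofList l.flatten) (fun x => x)).flatMap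
          (fun k => List.replicate (List.count k l.flatten) k) := by
  have hflat : l.flatMap (fun pair => pair) = l.flatten := by simp
  set keys := PySem.List.sorted (PySem.Set.ofList l.flatten) (fun x => x) with hkeys
  have hklt : keys.Pairwise (· < ·) := PySem.List.sorted_ofList_pairwise_lt l.flatten
  have hknd : keys.Nodup := hklt.imp ne_of_lt
  have hmem : ∀ v : Int, v ∈ keys ↔ v ∈ l.flatten := by
    intro v
    rw [hkeys, PySem.List.mem_sorted, PySem.Set.mem_ofList]
  rw [hflat]
  apply PySem.List.sorted_id_eq_of_perm_of_pairwise
  · rw [List.perm_iff_count]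
    intro v
    rw [pv_count_flatMap keys _ hknd v]
    by_cases hv : v ∈ l.flatten
    · simp [(hmem v).mpr hv]
    · rw [if_neg (fun h => hv ((hmem v).mp h)), List.count_eq_zero.mpr hv]
  · rw [List.flatMap_def, List.pairwise_flatten]
    refine ⟨?_, ?_⟩
    · intro x hx
      obtain ⟨k, _, rfl⟩ := List.mem_map.mp hx
      exact List.pairwise_replicate.mpr (Or.inr le_rfl)
    · refine hklt.map _ ?_
      intro a b hab x hx y hy
      rw [List.eq_of_mem_replicate hx, List.eq_of_mem_replicate hy]
      exact le_of_lt hab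

-- one run: all further copies of the same id bump the last count
theorem pv_rl_run (k : Int) : ∀ (m : Nat) (res : List (List Int)) (j : Int),
    List.foldl pvRlStep (res ++ [[k, j]]) (List.replicate m k) = res ++ [[k, j + m]] := by
  intro m
  induction m with
  | zero => intro res j; simp
  | succ m ih =>
    intro res j
    rw [List.replicate_succ, List.foldl_cons]
    have hstep : pvRlStep (res ++ [[k, j]]) k = res ++ [[k, j + 1]] := by
      simp [pvRlStep]
    rw [hstep, ih res (j + 1)]
    have : j + 1 + (m : Int) = j + ((m + 1 : Nat) : Int) := by push_cast; ring
    rw [this]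

-- the whole grouping loop over the concatenated runs
theorem pv_rl_go (c : Int → Nat) : ∀ (ks : List Int), ks.Pairwise (· < ·) →
    (∀ k ∈ ks, 0 < c k) → ∀ (res : List (List Int)) (k0 : Int) (j : Int),
    (∀ k ∈ ks, k0 < k) →
    List.foldl pvRlStep (res ++ [[k0, j]]) (ks.flatMap (fun k => List.replicate (c k) k))
      = (res ++ [[k0, j]]) ++ ks.map (fun k => [k, (c k : Int)]) := by
  intro ks
  induction ks with
  | nil => intro _ _ res k0 j _; simp
  | cons k ks ih =>
    intro hp hc res k0 j hlt
    obtain ⟨m, hm⟩ : ∃ m, c k = m + 1 :=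
      ⟨c k - 1, by have := hc k (by simp); omega⟩
    rw [List.flatMap_cons, List.foldl_append, hm, List.replicate_succ, List.foldl_cons]
    have hstep : pvRlStep (res ++ [[k0, j]]) k = (res ++ [[k0, j]]) ++ [[k, 1]] := by
      have hne : k0 ≠ k := ne_of_lt (hlt k (by simp))
      simp [pvRlStep, hne]
    rw [hstep, pv_rl_run k m (res ++ [[k0, j]]) 1,
        ih (List.pairwise_cons.mp hp).2 (fun x hx => hc x (by simp [hx]))
          (res ++ [[k0, j]]) k (1 + m) (fun x hx => (List.pairwise_cons.mp hp).1 x hx)]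
    have : (1 + (m : Int)) = ((c k : Nat) : Int) := by rw [hm]; push_cast; ring
    rw [this]
    simp

-- B equals the canonical value
theorem pv_B_eq (l : List (List Int)) : get_connectivity_alt l = pvTarget l := by
  unfold get_connectivity_alt pvTarget
  rw [pv_sorted_flat]
  set keys := PySem.List.sorted (PySem.Set.ofList l.flatten) (fun x => x) with hkeys
  have hklt : keys.Pairwise (· < ·) := PySem.List.sorted_ofList_pairwise_lt l.flatten
  have hcpos : ∀ k ∈ keys, 0 < List.count k l.flatten := by
    intro k hk
    have : k ∈ l.flatten := by
      rw [hkeys, PySem.List.mem_sorted, PySem.Set.mem_ofList] at hk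
      exact hk
    exact List.count_pos_iff.mpr this
  cases hk : keys with
  | nil => simp
  | cons k ks =>
    have hp := hk ▸ hklt
    have hc : ∀ x ∈ k :: ks, 0 < List.count x l.flatten := hk ▸ hcpos
    obtain ⟨m, hm⟩ : ∃ m, List.count k l.flatten = m + 1 :=
      ⟨List.count k l.flatten - 1, by have := hc k (by simp); omega⟩
    rw [List.flatMap_cons, List.foldl_append, hm, List.replicate_succ, List.foldl_cons]
    have hstep : pvRlStep [] k = [] ++ [[k, 1]] := by simp [pvRlStep]
    rw [hstep, pv_rl_run k m [] 1,
        pv_rl_go _ ks (List.pairwise_cons.mp hp).2 (fun x hx => hc x (by simp [hx]))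
          [] k (1 + m) (fun x hx => (List.pairwise_cons.mp hp).1 x hx)]
    have : (1 + (m : Int)) = ((List.count k l.flatten : Nat) : Int) := by
      rw [hm]; push_cast; ring
    rw [this]
    simp

-- ===== VERDICT (by name: the statement is the Claim_ definition above) =====
theorem get_connectivity_spec : Claim_equal_get_connectivity := by
  intro l _
  unfold Spec_get_connectivity
  rw [pv_A_eq, pv_B_eq]
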